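-- pv_equiv track=rewrite | github.com/snowdj/CodingPuzzles-Python | leet/source/searchBFS/reconstruct_sequence.py | sequenceReconstruction_bfs
-- ===== SOURCE A (Python) =====
-- def sequenceReconstruction_bfs(org, seqs):
--     from collections import defaultdict
--     edges = defaultdict(list)
--     indegrees = defaultdict(int)
--     nodes = set()
--
--     # build the graph for seqs
--     for seq in seqs:
--         nodes |= set(seq)
--         for i in range(len(seq)):
--             if i == 0:
--                 indegrees[seq[i]] += 0
--             if i < len(seq) - 1:
--                 edges[seq[i]].append(seq[i+1])
--                 indegrees[seq[i+1]] += 1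
--
--     queue = [k for k in indegrees if indegrees[k] == 0]
--     res = []
--
--     while len(queue) == 1:
--         cur_node = queue.pop()
--         res.append(cur_node)
--         for node in edges[cur_node]:
--             indegrees[node] -= 1
--             if indegrees[node] == 0:
--                 queue.append(node)
--
--     if len(queue) > 1:
--         return False
--     return len(res) == len(nodes) and res == org
-- ===== SOURCE B (Python) =====
-- def sequenceReconstruction_bfs(org, seqs):
--     if len(set(org)) != len(org):
--         return False
--     pos = {v: i for i, v in enumerate(org)}
--     seen = set()
--     matched = set()
--     for seq in seqs:
--         for v in seq:
--             if v not in pos: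
--                 return False
--             seen.add(v)
--         for a, b in zip(seq, seq[1:]):
--             if pos[a] >= pos[b]:
--                 return False
--             if pos[a] + 1 == pos[b]:
--                 matched.add(pos[a])
--     return len(seen) == len(org) and len(matched) == max(len(org) - 1, 0)
-- ===== Notes on version B (the rewrite author's own statement) =====
-- stated objective: faster
-- what changed: Replaces the graph build + Kahn topological BFS (edge lists, indegree dict, queue simulation) by a single scan that indexes org once and checks order, coverage and adjacent-pair matching against that index.
import Mathlib
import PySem

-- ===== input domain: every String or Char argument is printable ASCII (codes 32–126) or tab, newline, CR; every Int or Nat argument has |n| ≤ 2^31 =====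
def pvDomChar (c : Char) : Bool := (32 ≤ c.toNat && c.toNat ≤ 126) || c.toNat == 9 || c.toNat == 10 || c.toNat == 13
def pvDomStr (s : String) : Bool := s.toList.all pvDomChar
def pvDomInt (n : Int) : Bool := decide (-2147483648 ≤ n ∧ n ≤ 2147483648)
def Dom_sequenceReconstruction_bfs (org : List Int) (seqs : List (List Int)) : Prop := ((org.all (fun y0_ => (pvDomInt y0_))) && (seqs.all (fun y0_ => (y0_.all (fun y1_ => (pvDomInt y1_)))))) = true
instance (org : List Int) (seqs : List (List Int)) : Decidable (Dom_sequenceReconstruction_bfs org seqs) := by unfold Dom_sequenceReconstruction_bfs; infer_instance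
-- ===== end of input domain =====

-- B replaces A's graph build + Kahn BFS queue simulation by one scan over seqs against a
-- position index of org (order, coverage and adjacent-pair matching); proved to return the
-- same Bool on every input.


-- ===== PORT A =====
-- body of 'for i in range(len(seq))': the two guarded updates of (edges, indegrees)
def pvBuildStep (seq : List Int) (st : PySem.Dict Int (List Int) × PySem.Dict Int Int) (i : Int) :
    PySem.Dict Int (List Int) × PySem.Dict Int Int :=
  let st := if i == 0 then (st.1, st.2.modify (PySem.List.pyGetD seq i 0) 0 (· + 0)) else st
  if i < (seq.length : Int) - 1 then
    (st.1.modify (PySem.List.pyGetD seq i 0) [] (· ++ [PySem.List.pyGetD seq (i + 1) 0]),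
     st.2.modify (PySem.List.pyGetD seq (i + 1) 0) 0 (· + 1))
  else st

-- 'for seq in seqs': nodes |= set(seq); inner index loop
def pvBuild (seqs : List (List Int)) :
    (PySem.Dict Int (List Int) × PySem.Dict Int Int) × PySem.Set Int :=
  seqs.foldl
    (fun st seq =>
      ((PySem.List.pyRange 0 (seq.length : Int)).foldl (pvBuildStep seq) st.1,
       PySem.Set.union st.2 (PySem.Set.ofList seq)))
    ((PySem.Dict.empty, PySem.Dict.empty), PySem.Set.empty)

-- 'for node in edges[cur_node]': decrement indegree, enqueue on hitting 0
def pvDecStep (st : List Int × PySem.Dict Int Int) (node : Int) : List Int × PySem.Dict Int Int :=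
  let ind := st.2.modify node 0 (· - 1)
  if ind.getD node 0 == 0 then (st.1 ++ [node], ind) else (st.1, ind)

-- 'while len(queue) == 1' (fuel-bounded; fuel = number of indegree keys + 1 always suffices
-- because every node is enqueued at most once)
def pvLoopA (edges : PySem.Dict Int (List Int)) :
    Nat → List Int × List Int × PySem.Dict Int Int → List Int × List Int × PySem.Dict Int Int
  | 0, st => st
  | fuel + 1, (queue, res, ind) =>
    match queue with
    | [cur] =>
      let r := (edges.getD cur []).foldl pvDecStep ([], ind)
      pvLoopA edges fuel (r.1, res ++ [cur], r.2)
    | _ => (queue, res, ind)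

def sequenceReconstruction_bfs (org : List Int) (seqs : List (List Int)) : Bool :=
  let b := pvBuild seqs
  let edges := b.1.1
  let indegrees := b.1.2
  let nodes := b.2
  let queue := indegrees.keys.filter (fun k => indegrees.getD k 0 == 0)
  let r := pvLoopA edges (indegrees.size + 1) (queue, [], indegrees)
  if r.1.length > 1 then false
  else r.2.1.length == nodes.length && r.2.1 == org

-- ===== PORT B =====
-- pos = {v: i for i, v in enumerate(org)}
def pvBPos (org : List Int) : PySem.Dict Int Int :=
  (PySem.List.enumerate org).foldl (fun d p => d.insert p.2 p.1) PySem.Dict.empty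

-- 'for v in seq: if v not in pos: return False; seen.add(v)'
def pvBSeen (pos : PySem.Dict Int Int) : List Int → PySem.Set Int → Option (PySem.Set Int)
  | [], seen => some seen
  | v :: vs, seen => if pos.contains v then pvBSeen pos vs (PySem.Set.add seen v) else none

-- 'for a, b in zip(seq, seq[1:]): …'
def pvBPairs (pos : PySem.Dict Int Int) : List (Int × Int) → PySem.Set Int → Option (PySem.Set Int)
  | [], m => some m
  | (a, b) :: ps, m =>
    if pos.getD a 0 ≥ pos.getD b 0 then none
    else pvBPairs pos ps
      (if pos.getD a 0 + 1 == pos.getD b 0 then PySem.Set.add m (pos.getD a 0) else m)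

-- 'for seq in seqs' with the two early-returning inner loops
def pvBLoop (pos : PySem.Dict Int Int) :
    List (List Int) → PySem.Set Int × PySem.Set Int → Option (PySem.Set Int × PySem.Set Int)
  | [], st => some st
  | seq :: rest, (seen, matched) =>
    match pvBSeen pos seq seen with
    | none => none
    | some seen' =>
      match pvBPairs pos (seq.zip (PySem.List.slice seq (some 1))) matched with
      | none => none
      | some matched' => pvBLoop pos rest (seen', matched')

def sequenceReconstruction_bfs_alt (org : List Int) (seqs : List (List Int)) : Bool :=
  if (PySem.Set.ofList org).length ≠ org.length then false
  else
    match pvBLoop (pvBPos org) seqs (PySem.Set.empty, PySem.Set.empty) with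
    | none => false
    | some (seen, matched) =>
      seen.length == org.length && (matched.length : Int) == max ((org.length : Int) - 1) 0

-- ===== PRECONDITION & SPEC =====
def Spec_sequenceReconstruction_bfs (org : List Int) (seqs : List (List Int)) (out : Bool) : Prop := out = sequenceReconstruction_bfs_alt org seqs
instance (org : List Int) (seqs : List (List Int)) (out : Bool) : Decidable (Spec_sequenceReconstruction_bfs org seqs out) := by unfold Spec_sequenceReconstruction_bfs; infer_instance

-- ===== CLAIM (what is proved, stated in full; the proofs are below) =====
def Claim_equal_sequenceReconstruction_bfs : Prop := ∀ (org : List Int) (seqs : List (List Int)), Dom_sequenceReconstruction_bfs org seqs → Spec_sequenceReconstruction_bfs org seqs (sequenceReconstruction_bfs org seqs)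

-- ===== LEMMAS AND PROOFS =====

-- ---- abstract views of the input ----
def pvPairs (seqs : List (List Int)) : List (Int × Int) := seqs.flatMap (fun s => s.zip s.tail)
def pvElems (seqs : List (List Int)) : List Int := seqs.flatMap id
-- remaining indegree of v once the sources in res have been popped
def pvCnt (seqs : List (List Int)) (res : List Int) (v : Int) : Nat :=
  (pvPairs seqs).countP (fun p => decide (p.2 = v ∧ p.1 ∉ res))
def pvEdges0 (seqs : List (List Int)) (u : Int) : List Int :=
  ((pvPairs seqs).filter (fun p => p.1 == u)).map Prod.snd
-- the conditions B checks, as one Prop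
def pvBconds (org : List Int) (seqs : List (List Int)) : Prop :=
  org.Nodup ∧ (∀ v ∈ pvElems seqs, v ∈ org) ∧ (∀ v ∈ org, v ∈ pvElems seqs) ∧
  (∀ p ∈ pvPairs seqs, org.idxOf p.1 < org.idxOf p.2) ∧
  (∀ i : Nat, i + 1 < org.length → (org[i]!, org[i + 1]!) ∈ pvPairs seqs)

-- ---- tiny list facts ----
theorem pv_singleton_of_nodup {l : List Int} {a : Int} (hnd : l.Nodup)
    (h : ∀ x, x ∈ l ↔ x = a) : l = [a] := by
  cases l with
  | nil => exact absurd ((h a).2 rfl) (by simp)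
  | cons x t =>
    have hx : x = a := (h x).1 (by simp)
    subst hx
    have : t = [] := by
      apply List.eq_nil_iff_forall_not_mem.2
      intro y hy
      have := (h y).1 (by simp [hy])
      subst this
      exact (List.nodup_cons.1 hnd).1 hy
    simp [this]

theorem pv_mem_pvElems {seqs : List (List Int)} {p : Int × Int} (hp : p ∈ pvPairs seqs) :
    p.1 ∈ pvElems seqs ∧ p.2 ∈ pvElems seqs := by
  simp only [pvPairs, List.mem_flatMap] at hp
  obtain ⟨s, hs, hps⟩ := hp
  obtain ⟨h1, h2⟩ := List.of_mem_zip (by rwa [← Prod.mk.eta (p := p)] at hps)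
  constructor
  · exact List.mem_flatMap.2 ⟨s, hs, h1⟩
  · exact List.mem_flatMap.2 ⟨s, hs, List.mem_of_mem_tail h2⟩

theorem pv_snd_zip_tail (s : List Int) : (s.zip s.tail).map Prod.snd = s.tail := by
  apply List.map_snd_zip
  cases s <;> simp

-- ---- build phase: fuse the 'for i in range(len(seq))' loop into a fold over adjacent pairs ----
def pvTailStep (seq : List Int) (st : PySem.Dict Int (List Int) × PySem.Dict Int Int) (i : Int) :
    PySem.Dict Int (List Int) × PySem.Dict Int Int :=
  if i < (seq.length : Int) - 1 then
    (st.1.modify (PySem.List.pyGetD seq i 0) [] (· ++ [PySem.List.pyGetD seq (i + 1) 0]),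
     st.2.modify (PySem.List.pyGetD seq (i + 1) 0) 0 (· + 1))
  else st

def pvPairStep (st : PySem.Dict Int (List Int) × PySem.Dict Int Int) (p : Int × Int) :
    PySem.Dict Int (List Int) × PySem.Dict Int Int :=
  (st.1.modify p.1 [] (· ++ [p.2]), st.2.modify p.2 0 (· + 1))

def pvHeadStep (seq : List Int) (st : PySem.Dict Int (List Int) × PySem.Dict Int Int) :
    PySem.Dict Int (List Int) × PySem.Dict Int Int :=
  match seq with
  | [] => st
  | a :: _ => (st.1, st.2.modify a 0 (· + 0))

theorem pv_pyRange_succ (a b : Int) :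
    PySem.List.pyRange (a + 1) (b + 1) = (PySem.List.pyRange a b).map (· + 1) := by
  rw [PySem.List.pyRange_of_pos _ _ (by norm_num : (0:Int) < 1),
      PySem.List.pyRange_of_pos _ _ (by norm_num : (0:Int) < 1), List.map_map]
  have h1 : (if a + 1 < b + 1 then ((b + 1 - (a + 1) + 1 - 1) / 1).toNat else 0)
      = (if a < b then ((b - a + 1 - 1) / 1).toNat else 0) := by
    by_cases h : a < b
    · rw [if_pos (by omega), if_pos h]; ring_nf
    · rw [if_neg (by omega), if_neg h]
  rw [h1]
  apply List.map_congr_left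
  intro k _
  simp; ring

theorem pv_pyGetD_cons (x : Int) (t : List Int) (i : Int) (h : 0 ≤ i) :
    PySem.List.pyGetD (x :: t) (i + 1) 0 = PySem.List.pyGetD t i 0 := by
  obtain ⟨n, rfl⟩ := Int.eq_ofNat_of_zero_le h
  rw [show ((n : Int) + 1) = ((n + 1 : Nat) : Int) by push_cast; ring]
  rw [PySem.List.pyGetD_natCast, PySem.List.pyGetD_natCast]
  simp

theorem pv_pyRange_shift (b : Int) :
    PySem.List.pyRange 1 (b + 1) = (PySem.List.pyRange 0 b).map (· + 1) := by
  have := pv_pyRange_succ 0 b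
  simpa using this

theorem pvg0 (x : Int) (l : List Int) : PySem.List.pyGetD (x :: l) 0 0 = x := by
  rw [PySem.List.pyGetD_of_nonneg _ _ le_rfl]; simp

theorem pvg1 (x y : Int) (l : List Int) : PySem.List.pyGetD (x :: y :: l) (0 + 1) 0 = y := by
  rw [PySem.List.pyGetD_of_nonneg _ _ (by norm_num)]; simp

theorem pv_buildStep_eq_tailStep (seq : List Int) (st : PySem.Dict Int (List Int) × PySem.Dict Int Int)
    (i : Int) (h : i ≠ 0) : pvBuildStep seq st i = pvTailStep seq st i := by
  simp only [pvBuildStep, pvTailStep, show (i == 0) = false by simpa using h]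
  simp

theorem pv_shiftT (a : Int) (t : List Int) (st : PySem.Dict Int (List Int) × PySem.Dict Int Int) :
    (PySem.List.pyRange 1 ((a :: t).length : Int)).foldl (pvTailStep (a :: t)) st =
    (PySem.List.pyRange 0 (t.length : Int)).foldl (pvTailStep t) st := by
  rw [show ((a :: t).length : Int) = (t.length : Int) + 1 by simp, pv_pyRange_shift, List.foldl_map]
  apply PySem.List.foldl_congr_mem
  intro acc i hi
  have h0 : 0 ≤ i := (PySem.List.mem_pyRange_one.1 hi).1
  show pvTailStep (a :: t) acc (i + 1) = pvTailStep t acc i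
  unfold pvTailStep
  rw [pv_pyGetD_cons a t i h0, pv_pyGetD_cons a t (i + 1) (by omega)]
  by_cases hl : i < (t.length : Int) - 1
  · rw [if_pos (by simp only [List.length_cons]; push_cast; omega), if_pos hl]
  · rw [if_neg (by simp only [List.length_cons]; push_cast; omega), if_neg hl]

theorem pv_tail_fold (t : List Int) (st : PySem.Dict Int (List Int) × PySem.Dict Int Int) :
    (PySem.List.pyRange 0 (t.length : Int)).foldl (pvTailStep t) st =
    (t.zip t.tail).foldl pvPairStep st := by
  induction t generalizing st with
  | nil => rfl
  | cons a t2 ih =>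
    rw [PySem.List.pyRange_one_cons (by simp <;> omega), List.foldl_cons]
    simp only [zero_add]
    rw [pv_shiftT, ih]
    cases t2 with
    | nil => rfl
    | cons b t3 =>
      show List.foldl pvPairStep (pvTailStep (a :: b :: t3) st 0) ((b :: t3).zip (b :: t3).tail)
          = List.foldl pvPairStep st ((a :: b :: t3).zip (b :: t3))
      have hst : pvTailStep (a :: b :: t3) st 0 = pvPairStep st (a, b) := by
        unfold pvTailStep pvPairStep
        rw [if_pos (by simp <;> omega), pvg0, pvg1]
      rw [hst]
      rfl

theorem pv_master (seq : List Int) (st : PySem.Dict Int (List Int) × PySem.Dict Int Int) :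
    (PySem.List.pyRange 0 (seq.length : Int)).foldl (pvBuildStep seq) st =
    (seq.zip seq.tail).foldl pvPairStep (pvHeadStep seq st) := by
  cases seq with
  | nil => rfl
  | cons a t =>
    rw [PySem.List.pyRange_one_cons (by simp <;> omega), List.foldl_cons]
    simp only [zero_add]
    have hcong : ∀ X, (PySem.List.pyRange 1 ((a :: t).length : Int)).foldl (pvBuildStep (a :: t)) X =
        (PySem.List.pyRange 1 ((a :: t).length : Int)).foldl (pvTailStep (a :: t)) X := by
      intro X
      apply PySem.List.foldl_congr_mem
      intro acc i hi
      exact pv_buildStep_eq_tailStep _ _ _ (by have := (PySem.List.mem_pyRange_one.1 hi).1; omega)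
    rw [hcong, pv_shiftT, pv_tail_fold]
    have hstep : pvBuildStep (a :: t) st 0 = pvTailStep (a :: t) (pvHeadStep (a :: t) st) 0 := by
      simp only [pvBuildStep, pvTailStep, pvHeadStep, show ((0:Int) == 0) = true by rfl, if_true]
      rw [pvg0]
    rw [hstep]
    cases t with
    | nil => rfl
    | cons b t3 =>
      have : pvTailStep (a :: b :: t3) (pvHeadStep (a :: b :: t3) st) 0
          = pvPairStep (pvHeadStep (a :: b :: t3) st) (a, b) := by
        unfold pvTailStep pvPairStep
        rw [if_pos (by simp <;> omega), pvg0, pvg1]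
      rw [this]
      rfl

-- split the pair fold into its two independent components (instance of PySem.List.foldl_prod_mk
-- specialised to pvPairStep so that it rewrites syntactically)
theorem pv_pairFold_split (ps : List (Int × Int)) (e : PySem.Dict Int (List Int))
    (d : PySem.Dict Int Int) :
    ps.foldl pvPairStep (e, d) =
      (ps.foldl (fun e p => e.modify p.1 [] (· ++ [p.2])) e,
       ps.foldl (fun d p => d.modify p.2 0 (· + 1)) d) := by
  induction ps generalizing e d with
  | nil => rfl
  | cons p ps ih => simp [pvPairStep, ih]

-- observables of the pair fold
theorem pv_pairFold_ind (ps : List (Int × Int)) (st : PySem.Dict Int (List Int) × PySem.Dict Int Int)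
    (v : Int) :
    ((ps.foldl pvPairStep st).2).getD v 0 = st.2.getD v 0 + ((ps.map Prod.snd).count v : Int) := by
  obtain ⟨e, d⟩ := st
  rw [pv_pairFold_split]
  show (List.foldl (fun d p => PySem.Dict.modify d p.2 0 (· + 1)) d ps).getD v 0 = _
  rw [show (fun (d : PySem.Dict Int Int) (p : Int × Int) => PySem.Dict.modify d p.2 0 (· + 1)) =
      (fun (d : PySem.Dict Int Int) (p : Int × Int) => PySem.Dict.modify d (Prod.snd p) 0 (· + 1)) from rfl]
  rw [← List.foldl_map (f := Prod.snd) (g := fun (d : PySem.Dict Int Int) x => d.modify x 0 (· + 1))]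
  exact PySem.Dict.getD_foldl_modify_add_one (ps.map Prod.snd) d v

theorem pv_pairFold_edges (ps : List (Int × Int)) (st : PySem.Dict Int (List Int) × PySem.Dict Int Int)
    (u : Int) :
    ((ps.foldl pvPairStep st).1).getD u [] =
      st.1.getD u [] ++ (ps.filter (fun p => p.1 == u)).map Prod.snd := by
  obtain ⟨e, d⟩ := st
  rw [pv_pairFold_split]
  exact PySem.Dict.getD_foldl_modify_append ps e u

theorem pv_pairFold_keys (ps : List (Int × Int)) (st : PySem.Dict Int (List Int) × PySem.Dict Int Int) :
    ((ps.foldl pvPairStep st).2).keys = PySem.Set.update st.2.keys (ps.map Prod.snd) := by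
  obtain ⟨e, d⟩ := st
  rw [pv_pairFold_split]
  exact PySem.Dict.keys_foldl_modify_key ps Prod.snd 0 (fun _ _ => (· + 1)) d

theorem pv_headStep_ind (seq : List Int) (st : PySem.Dict Int (List Int) × PySem.Dict Int Int)
    (v : Int) : ((pvHeadStep seq st).2).getD v 0 = st.2.getD v 0 := by
  cases seq with
  | nil => rfl
  | cons a t =>
    show (st.2.modify a 0 (· + 0)).getD v 0 = st.2.getD v 0
    rw [PySem.Dict.getD_modify]
    split_ifs with h
    · subst h; ring
    · rfl

theorem pv_headStep_keys_mem (seq : List Int) (st : PySem.Dict Int (List Int) × PySem.Dict Int Int)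
    (v : Int) :
    v ∈ ((pvHeadStep seq st).2).keys ↔ v ∈ st.2.keys ∨ v ∈ seq.take 1 := by
  cases seq with
  | nil => simp [pvHeadStep]
  | cons a t =>
    show v ∈ (st.2.modify a 0 (· + 0)).keys ↔ _
    rw [PySem.Dict.keys_modify]
    rw [PySem.Dict.mem_keys_insert]
    simp [Or.comm]

theorem pv_headStep_keys_nodup (seq : List Int) (st : PySem.Dict Int (List Int) × PySem.Dict Int Int)
    (h : st.2.keys.Nodup) : ((pvHeadStep seq st).2).keys.Nodup := by
  cases seq with
  | nil => exact h
  | cons a t =>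
    show (st.2.modify a 0 (· + 0)).keys.Nodup
    rw [PySem.Dict.keys_modify]
    exact PySem.Dict.nodup_keys_insert _ _ _ h

theorem pv_headStep_edges (seq : List Int) (st : PySem.Dict Int (List Int) × PySem.Dict Int Int) :
    (pvHeadStep seq st).1 = st.1 := by
  cases seq <;> rfl

-- observables of the whole build
def pvBfold (seqs : List (List Int))
    (st : (PySem.Dict Int (List Int) × PySem.Dict Int Int) × PySem.Set Int) :
    (PySem.Dict Int (List Int) × PySem.Dict Int Int) × PySem.Set Int :=
  seqs.foldl
    (fun st seq =>
      ((PySem.List.pyRange 0 (seq.length : Int)).foldl (pvBuildStep seq) st.1,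
       PySem.Set.union st.2 (PySem.Set.ofList seq)))
    st

theorem pv_build_eq (seqs : List (List Int)) :
    pvBuild seqs = pvBfold seqs ((PySem.Dict.empty, PySem.Dict.empty), PySem.Set.empty) := rfl

theorem pv_bfold_ind (seqs : List (List Int)) (st) (v : Int) :
    ((pvBfold seqs st).1.2).getD v 0 =
      st.1.2.getD v 0 + (((pvPairs seqs).map Prod.snd).count v : Int) := by
  induction seqs generalizing st with
  | nil => simp [pvBfold, pvPairs]
  | cons s ss ih =>
    show ((pvBfold ss _).1.2).getD v 0 = _
    rw [ih]
    rw [show ((PySem.List.pyRange 0 (s.length : Int)).foldl (pvBuildStep s) st.1,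
        PySem.Set.union st.2 (PySem.Set.ofList s)).1.2 =
        ((PySem.List.pyRange 0 (s.length : Int)).foldl (pvBuildStep s) st.1).2 from rfl]
    rw [pv_master, pv_pairFold_ind, pv_headStep_ind]
    have hps : pvPairs (s :: ss) = (s.zip s.tail) ++ pvPairs ss := by
      simp [pvPairs]
    rw [hps, List.map_append, List.count_append]
    push_cast
    ring

theorem pv_bfold_edges (seqs : List (List Int)) (st) (u : Int) :
    ((pvBfold seqs st).1.1).getD u [] = st.1.1.getD u [] ++ pvEdges0 seqs u := by
  induction seqs generalizing st with
  | nil => simp [pvBfold, pvEdges0, pvPairs]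
  | cons s ss ih =>
    show ((pvBfold ss _).1.1).getD u [] = _
    rw [ih]
    rw [show ((PySem.List.pyRange 0 (s.length : Int)).foldl (pvBuildStep s) st.1,
        PySem.Set.union st.2 (PySem.Set.ofList s)).1.1 =
        ((PySem.List.pyRange 0 (s.length : Int)).foldl (pvBuildStep s) st.1).1 from rfl]
    rw [pv_master, pv_pairFold_edges, pv_headStep_edges]
    have hps : pvPairs (s :: ss) = (s.zip s.tail) ++ pvPairs ss := by
      simp [pvPairs]
    simp [pvEdges0, hps, List.filter_append]

theorem pv_bfold_keys_mem (seqs : List (List Int)) (st) (v : Int) :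
    v ∈ ((pvBfold seqs st).1.2).keys ↔ v ∈ st.1.2.keys ∨ v ∈ pvElems seqs := by
  induction seqs generalizing st with
  | nil => simp [pvBfold, pvElems]
  | cons s ss ih =>
    show v ∈ ((pvBfold ss _).1.2).keys ↔ _
    rw [ih]
    rw [show ((PySem.List.pyRange 0 (s.length : Int)).foldl (pvBuildStep s) st.1,
        PySem.Set.union st.2 (PySem.Set.ofList s)).1.2 =
        ((PySem.List.pyRange 0 (s.length : Int)).foldl (pvBuildStep s) st.1).2 from rfl]
    rw [pv_master, pv_pairFold_keys]
    rw [PySem.Set.mem_update, pv_headStep_keys_mem]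
    have hmem : v ∈ (s.zip s.tail).map Prod.snd ↔ v ∈ s.tail := by
      rw [pv_snd_zip_tail]
    have hse : (v ∈ s.take 1 ∨ v ∈ s.tail) ↔ v ∈ s := by
      cases s <;> simp
    have hel : v ∈ pvElems (s :: ss) ↔ v ∈ s ∨ v ∈ pvElems ss := by
      simp [pvElems]
    rw [hmem, hel, ← hse]
    tauto

theorem pv_bfold_keys_nodup (seqs : List (List Int)) (st) (h : st.1.2.keys.Nodup) :
    ((pvBfold seqs st).1.2).keys.Nodup := by
  induction seqs generalizing st with
  | nil => exact h
  | cons s ss ih =>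
    apply ih
    rw [show ((PySem.List.pyRange 0 (s.length : Int)).foldl (pvBuildStep s) st.1,
        PySem.Set.union st.2 (PySem.Set.ofList s)).1.2 =
        ((PySem.List.pyRange 0 (s.length : Int)).foldl (pvBuildStep s) st.1).2 from rfl]
    rw [pv_master, pv_pairFold_keys]
    exact PySem.Set.nodup_update _ _ (pv_headStep_keys_nodup s st.1 h)

theorem pv_bfold_nodes_mem (seqs : List (List Int)) (st) (v : Int) :
    v ∈ (pvBfold seqs st).2 ↔ v ∈ st.2 ∨ v ∈ pvElems seqs := by
  induction seqs generalizing st with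
  | nil => simp [pvBfold, pvElems]
  | cons s ss ih =>
    show v ∈ (pvBfold ss _).2 ↔ _
    rw [ih]
    rw [show ((PySem.List.pyRange 0 (s.length : Int)).foldl (pvBuildStep s) st.1,
        PySem.Set.union st.2 (PySem.Set.ofList s)).2 =
        PySem.Set.union st.2 (PySem.Set.ofList s) from rfl]
    rw [PySem.Set.mem_union]
    have hel : v ∈ pvElems (s :: ss) ↔ v ∈ s ∨ v ∈ pvElems ss := by
      simp [pvElems]
    rw [hel, PySem.Set.mem_ofList]
    tauto

theorem pv_bfold_nodes_nodup (seqs : List (List Int)) (st) (h : List.Nodup st.2) :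
    List.Nodup (pvBfold seqs st).2 := by
  induction seqs generalizing st with
  | nil => exact h
  | cons s ss ih =>
    apply ih
    exact PySem.Set.nodup_union _ _ h

-- ---- counting facts ----
theorem pv_edges0_count (seqs : List (List Int)) (u v : Int) :
    (pvEdges0 seqs u).count v =
      (pvPairs seqs).countP (fun p => decide (p.1 = u ∧ p.2 = v)) := by
  rw [pvEdges0, List.count_eq_countP, List.countP_map, List.countP_filter]
  apply List.countP_congr
  intro p _
  simp [Function.comp, and_comm]

theorem pv_cnt_nil (seqs : List (List Int)) (v : Int) :
    pvCnt seqs [] v = ((pvPairs seqs).map Prod.snd).count v := by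
  rw [pvCnt, List.count_eq_countP, List.countP_map]
  apply List.countP_congr
  intro p _
  simp [Function.comp]

theorem pv_cnt_aux (res : List Int) (cur v : Int) (h : cur ∉ res) :
    ∀ l : List (Int × Int),
      l.countP (fun p => decide (p.2 = v ∧ p.1 ∉ res)) =
        l.countP (fun p => decide (p.2 = v ∧ p.1 ∉ res ++ [cur])) +
        l.countP (fun p => decide (p.1 = cur ∧ p.2 = v)) := by
  intro l
  induction l with
  | nil => rfl
  | cons p t ih =>
    simp only [List.countP_cons, ih]
    by_cases h2 : p.2 = v <;> by_cases h1c : p.1 = cur <;> by_cases h1r : p.1 ∈ res <;>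
      simp [h2, h1c, h1r, h] <;> omega

theorem pv_cnt_step (seqs : List (List Int)) (res : List Int) (cur v : Int) (h : cur ∉ res) :
    pvCnt seqs res v = pvCnt seqs (res ++ [cur]) v + (pvEdges0 seqs cur).count v := by
  rw [pvCnt, pvCnt, pv_edges0_count]
  exact pv_cnt_aux res cur v h (pvPairs seqs)

theorem pv_cnt_eq_zero_iff (seqs : List (List Int)) (res : List Int) (v : Int) :
    pvCnt seqs res v = 0 ↔ ∀ p ∈ pvPairs seqs, p.2 = v → p.1 ∈ res := by
  rw [pvCnt, List.countP_eq_zero]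
  constructor
  · intro h p hp h2
    by_contra hc
    exact h p hp (by simp [h2, hc])
  · intro h p hp hd
    simp only [decide_eq_true_eq] at hd
    exact hd.2 (h p hp hd.1)

-- ---- the decrement fold ('for node in edges[cur_node]') ----
theorem pv_decStep_eq (acc : List Int) (ind : PySem.Dict Int Int) (n : Int) :
    pvDecStep (acc, ind) n =
      (if (ind.modify n 0 (· - 1)).getD n 0 == 0 then acc ++ [n] else acc,
       ind.modify n 0 (· - 1)) := by
  show (if ((ind.modify n 0 (· - 1)).getD n 0 == 0) = true
      then (acc ++ [n], ind.modify n 0 (· - 1)) else (acc, ind.modify n 0 (· - 1))) = _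
  split_ifs with h <;> rfl

theorem pv_dec_ind (tg : List Int) (acc : List Int) (ind : PySem.Dict Int Int) (v : Int) :
    ((tg.foldl pvDecStep (acc, ind)).2).getD v 0 = ind.getD v 0 - (tg.count v : Int) := by
  induction tg generalizing acc ind with
  | nil => simp
  | cons n t ih =>
    rw [List.foldl_cons, pv_decStep_eq]
    rw [show (List.foldl pvDecStep
        (if (ind.modify n 0 (· - 1)).getD n 0 == 0 then acc ++ [n] else acc,
         ind.modify n 0 (· - 1)) t) =
        (List.foldl pvDecStep
        ((if (ind.modify n 0 (· - 1)).getD n 0 == 0 then acc ++ [n] else acc),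
         (ind.modify n 0 (· - 1))) t) from rfl]
    rw [ih]
    rw [PySem.Dict.getD_modify]
    by_cases hv : v = n
    · subst hv
      rw [if_pos rfl, List.count_cons_self]
      push_cast
      ring
    · rw [if_neg hv]
      simp [List.count_cons, beq_iff_eq]
      exact fun h => hv h.symm

theorem pv_count_cons_ne {v n : Int} (t : List Int) (h : ¬ v = n) :
    List.count v (n :: t) = List.count v t :=
  List.count_cons_of_ne (fun hh => h hh.symm)

theorem pv_dec_aux_h (n : Int) (t : List Int) (ind : PySem.Dict Int Int)
    (h : ∀ v, ((n :: t).count v : Int) ≤ ind.getD v 0) :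
    ∀ v, ((t.count v : Int)) ≤ (ind.modify n 0 (· - 1)).getD v 0 := by
  intro v
  rw [PySem.Dict.getD_modify]
  by_cases hv : v = n
  · subst hv
    rw [if_pos rfl]
    have := h v
    rw [List.count_cons_self] at this
    push_cast at this ⊢
    omega
  · rw [if_neg hv]
    have := h v
    rwa [pv_count_cons_ne t hv] at this

theorem pv_dec_mem (tg : List Int) (acc : List Int) (ind : PySem.Dict Int Int)
    (h : ∀ v, (tg.count v : Int) ≤ ind.getD v 0) (w : Int) :
    w ∈ (tg.foldl pvDecStep (acc, ind)).1 ↔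
      w ∈ acc ∨ (w ∈ tg ∧ ind.getD w 0 = (tg.count w : Int)) := by
  induction tg generalizing acc ind with
  | nil => simp
  | cons n t ih =>
    have h' := pv_dec_aux_h n t ind h
    rw [List.foldl_cons, pv_decStep_eq]
    rw [show (List.foldl pvDecStep
        (if ((ind.modify n 0 (· - 1)).getD n 0 == 0) then acc ++ [n] else acc,
         ind.modify n 0 (· - 1)) t) =
        (List.foldl pvDecStep
        ((if ((ind.modify n 0 (· - 1)).getD n 0 == 0) then acc ++ [n] else acc),
         (ind.modify n 0 (· - 1))) t) from rfl]
    rw [ih _ _ h']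
    have hself : (ind.modify n 0 (· - 1)).getD n 0 = ind.getD n 0 - 1 := by
      rw [PySem.Dict.getD_modify, if_pos rfl]
    have hcount_n : ((n :: t).count n : Int) = (t.count n : Int) + 1 := by
      rw [List.count_cons_self]; push_cast; ring
    by_cases hw : w = n
    · subst hw
      have hA := h w
      rw [hcount_n] at hA
      by_cases hA1 : ind.getD w 0 = 1
      · rw [hself, if_pos (by simp [hA1])]
        have hcN : (t.count w : Int) = 0 := by omega
        apply iff_of_true
        · left; simp
        · right
          refine ⟨by simp, by rw [hcount_n, hA1, hcN]; norm_num⟩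
      · rw [hself, if_neg (by simp; omega)]
        rw [hcount_n]
        by_cases hnt : w ∈ t
        · have : (ind.getD w 0 - 1 = (t.count w : Int)) ↔
              (ind.getD w 0 = (t.count w : Int) + 1) := by omega
          simp [hnt, this]
        · have hc0 : (t.count w : Int) = 0 := by
            rw [List.count_eq_zero_of_not_mem hnt]; simp
          apply or_congr_right
          rw [hc0]
          constructor
          · rintro ⟨hmem, _⟩; exact absurd hmem hnt
          · rintro ⟨_, habs⟩; omega
    · have hmod : (ind.modify n 0 (· - 1)).getD w 0 = ind.getD w 0 := by
        rw [PySem.Dict.getD_modify, if_neg hw]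
      have hcnt : (n :: t).count w = t.count w := pv_count_cons_ne t hw
      have hacc : w ∈ (if ((ind.modify n 0 (· - 1)).getD n 0 == 0) then acc ++ [n] else acc)
          ↔ w ∈ acc := by
        split_ifs <;> simp [hw]
      rw [hacc, hmod, hcnt]
      simp [hw]

theorem pv_dec_nodup (tg : List Int) (acc : List Int) (ind : PySem.Dict Int Int)
    (h : ∀ v, (tg.count v : Int) ≤ ind.getD v 0) (hacc : acc.Nodup)
    (hdisj : ∀ w ∈ acc, ¬(w ∈ tg ∧ ind.getD w 0 = (tg.count w : Int))) :
    (tg.foldl pvDecStep (acc, ind)).1.Nodup := by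
  induction tg generalizing acc ind with
  | nil => exact hacc
  | cons n t ih =>
    have h' := pv_dec_aux_h n t ind h
    rw [List.foldl_cons, pv_decStep_eq]
    rw [show (List.foldl pvDecStep
        (if ((ind.modify n 0 (· - 1)).getD n 0 == 0) then acc ++ [n] else acc,
         ind.modify n 0 (· - 1)) t) =
        (List.foldl pvDecStep
        ((if ((ind.modify n 0 (· - 1)).getD n 0 == 0) then acc ++ [n] else acc),
         (ind.modify n 0 (· - 1))) t) from rfl]
    have hself : (ind.modify n 0 (· - 1)).getD n 0 = ind.getD n 0 - 1 := by
      rw [PySem.Dict.getD_modify, if_pos rfl]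
    have hA := h n
    rw [List.count_cons_self] at hA
    by_cases hA1 : ind.getD n 0 = 1
    · rw [hself, if_pos (by simp [hA1])]
      apply ih
      · exact h'
      · refine List.Nodup.append hacc (by simp) ?_
        intro x hx hx2
        simp only [List.mem_singleton] at hx2
        subst hx2
        refine hdisj x hx ⟨by simp, ?_⟩
        rw [List.count_cons_self, hA1]
        have : (t.count x : Int) = 0 := by push_cast at hA ⊢; omega
        push_cast
        omega
      · intro w hw
        rw [List.mem_append, List.mem_singleton] at hw
        rintro ⟨hwt, hweq⟩
        rcases hw with hw | hw
        · rw [PySem.Dict.getD_modify] at hweq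
          by_cases hwn : w = n
          · subst hwn
            refine hdisj _ hw ⟨by simp, ?_⟩
            rw [List.count_cons_self]
            push_cast at hA ⊢
            omega
          · rw [if_neg hwn] at hweq
            refine hdisj w hw ⟨by simp [hwt], ?_⟩
            rw [pv_count_cons_ne t hwn]
            exact hweq
        · subst hw
          have hpos : 0 < t.count w := List.count_pos_iff.2 hwt
          push_cast at hA
          omega
    · rw [hself, if_neg (by simp; omega)]
      apply ih
      · exact h'
      · exact hacc
      · intro w hw
        rintro ⟨hwt, hweq⟩
        rw [PySem.Dict.getD_modify] at hweq
        by_cases hwn : w = n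
        · subst hwn
          rw [if_pos rfl] at hweq
          refine hdisj w hw ⟨by simp, ?_⟩
          rw [List.count_cons_self]
          push_cast at hweq ⊢
          omega
        · rw [if_neg hwn] at hweq
          refine hdisj w hw ⟨by simp [hwt], ?_⟩
          rw [pv_count_cons_ne t hwn]
          exact hweq

theorem pv_mem_edges0 (seqs : List (List Int)) (u v : Int) :
    v ∈ pvEdges0 seqs u ↔ (u, v) ∈ pvPairs seqs := by
  simp only [pvEdges0, List.mem_map, List.mem_filter, beq_iff_eq]
  constructor
  · rintro ⟨p, ⟨hp, h1⟩, h2⟩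
    have : p = (u, v) := by
      apply Prod.ext <;> simp [h1, h2]
    rwa [this] at hp
  · intro hp
    exact ⟨(u, v), ⟨hp, rfl⟩, rfl⟩

-- ---- the while loop ----
def pvInv (seqs : List (List Int)) (queue res : List Int) (ind : PySem.Dict Int Int) : Prop :=
  (res ++ queue).Nodup ∧
  (∀ v, ind.getD v 0 = (pvCnt seqs res v : Int)) ∧
  (∀ v ∈ queue, pvCnt seqs res v = 0) ∧
  (∀ (j : Nat), j < res.length → ∀ p ∈ pvPairs seqs, p.2 = res[j]! → p.1 ∈ res.take j) ∧
  (∀ v ∈ res ++ queue, v ∈ pvElems seqs)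

theorem pv_getElem_bang (l : List Int) (i : Nat) (h : i < l.length) : l[i]! = l[i] :=
  getElem!_pos l i h

theorem pv_prefix_getElem_bang {l1 l2 : List Int} (h : l1 <+: l2) {i : Nat} (hi : i < l1.length) :
    l2[i]! = l1[i]! := by
  rw [getElem!_pos l2 i (lt_of_lt_of_le hi h.length_le), getElem!_pos l1 i hi]
  exact (List.IsPrefix.getElem h hi).symm

theorem pv_cnt_res_zero {seqs : List (List Int)} {queue res : List Int} {ind : PySem.Dict Int Int}
    (hI : pvInv seqs queue res ind) : ∀ v ∈ res, pvCnt seqs res v = 0 := by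
  intro v hv
  obtain ⟨j, hj, hjv⟩ := List.mem_iff_getElem.1 hv
  rw [pv_cnt_eq_zero_iff]
  intro p hp h2
  have := hI.2.2.2.1 j hj p hp (by rw [pv_getElem_bang res j hj, hjv]; exact h2)
  exact List.take_subset j res this

theorem pv_loop_general (seqs : List (List Int)) (edges : PySem.Dict Int (List Int))
    (hE : ∀ u, edges.getD u [] = pvEdges0 seqs u) :
    ∀ (fuel : Nat) (queue res : List Int) (ind : PySem.Dict Int Int),
      pvInv seqs queue res ind →
      pvInv seqs (pvLoopA edges fuel (queue, res, ind)).1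
        (pvLoopA edges fuel (queue, res, ind)).2.1 (pvLoopA edges fuel (queue, res, ind)).2.2 ∧
      res <+: (pvLoopA edges fuel (queue, res, ind)).2.1 ∧
      ((pvLoopA edges fuel (queue, res, ind)).2.1.length > res.length →
        (pvLoopA edges fuel (queue, res, ind)).2.1[res.length]! ∈ queue) ∧
      (∀ j : Nat, res.length ≤ j → j + 1 < (pvLoopA edges fuel (queue, res, ind)).2.1.length →
        ((pvLoopA edges fuel (queue, res, ind)).2.1[j]!,
         (pvLoopA edges fuel (queue, res, ind)).2.1[j + 1]!) ∈ pvPairs seqs) := by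
  intro fuel
  induction fuel with
  | zero =>
    intro queue res ind hI
    refine ⟨hI, List.prefix_refl res, by simp [pvLoopA], ?_⟩
    intro j hj hj1
    simp only [pvLoopA] at hj1
    omega
  | succ f ih =>
    intro queue res ind hI
    match queue with
    | [] =>
      refine ⟨hI, List.prefix_refl res, by simp [pvLoopA], ?_⟩
      intro j hj hj1
      simp only [pvLoopA] at hj1
      omega
    | cur1 :: cur2 :: qrest =>
      refine ⟨hI, List.prefix_refl res, by simp [pvLoopA], ?_⟩
      intro j hj hj1
      simp only [pvLoopA] at hj1
      omega
    | [cur] =>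
      obtain ⟨hnd, hind, hq0, hord, hel⟩ := hI
      have hloop : pvLoopA edges (f + 1) ([cur], res, ind) =
          pvLoopA edges f (((edges.getD cur []).foldl pvDecStep ([], ind)).1, res ++ [cur],
            ((edges.getD cur []).foldl pvDecStep ([], ind)).2) := rfl
      set tg := edges.getD cur [] with htg
      have htg' : tg = pvEdges0 seqs cur := hE cur
      have hcur_res : cur ∉ res := by
        have hh := hnd
        rw [List.nodup_append] at hh
        intro hc
        exact hh.2.2 cur hc cur (by simp) rfl
      have hcnt_cur : pvCnt seqs res cur = 0 := hq0 cur (by simp)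
      have hcount_le : ∀ v, (tg.count v : Int) ≤ ind.getD v 0 := by
        intro v
        rw [hind v, htg', pv_edges0_count]
        push_cast
        apply Nat.cast_le.2
        apply List.countP_mono_left
        intro p _ hp
        simp only [decide_eq_true_eq] at hp ⊢
        exact ⟨hp.2, hp.1 ▸ hcur_res⟩
      set r0 := tg.foldl pvDecStep ([], ind) with hr0
      have hind' : ∀ v, r0.2.getD v 0 = (pvCnt seqs (res ++ [cur]) v : Int) := by
        intro v
        rw [hr0, pv_dec_ind, hind v]
        have := pv_cnt_step seqs res cur v hcur_res
        rw [htg', pv_edges0_count]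
        rw [pv_edges0_count] at this
        push_cast
        omega
      have hmemq : ∀ w, w ∈ r0.1 ↔ w ∈ tg ∧ ind.getD w 0 = (tg.count w : Int) := by
        intro w
        rw [hr0]
        have := pv_dec_mem tg [] ind hcount_le w
        simpa using this
      have hq0' : ∀ v ∈ r0.1, pvCnt seqs (res ++ [cur]) v = 0 := by
        intro v hv
        have h1 := (hmemq v).1 hv
        have h2 := hind' v
        rw [hr0, pv_dec_ind, h1.2] at h2
        omega
      have hresz : ∀ v ∈ res ++ [cur], pvCnt seqs res v = 0 := by
        intro v hv
        rcases List.mem_append.1 hv with hv | hv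
        · exact pv_cnt_res_zero ⟨hnd, hind, hq0, hord, hel⟩ v hv
        · rw [List.mem_singleton] at hv
          subst hv
          exact hcnt_cur
      have hdisj2 : ∀ w ∈ r0.1, w ∉ res ++ [cur] := by
        intro w hw hc
        have h1 := (hmemq w).1 hw
        have hz := hresz w hc
        have : (0 : Int) < (tg.count w : Int) := by
          have := List.count_pos_iff.2 h1.1
          push_cast
          omega
        have := hind w
        rw [hz] at this
        push_cast at this
        omega
      have hInv' : pvInv seqs r0.1 (res ++ [cur]) r0.2 := by
        refine ⟨?_, hind', hq0', ?_, ?_⟩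
        · rw [List.nodup_append]
          refine ⟨hnd, ?_, ?_⟩
          · rw [hr0]
            apply pv_dec_nodup tg [] ind hcount_le (by simp)
            simp
          · intro a ha b hb heq
            exact hdisj2 b hb (heq ▸ ha)
        · intro j hj p hp h2
          rw [List.length_append, List.length_singleton] at hj
          by_cases hjr : j < res.length
          · rw [pv_getElem_bang _ j (by simp; omega), List.getElem_append_left hjr] at h2
            rw [List.take_append_of_le_length (by omega)]
            exact hord j hjr p hp (by rw [pv_getElem_bang _ j hjr]; exact h2)
          · have hj' : j = res.length := by omega
            subst hj'
            rw [pv_getElem_bang _ _ (by simp <;> omega)] at h2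
            simp only [List.getElem_concat_length] at h2
            rw [List.take_append_of_le_length (le_refl _), List.take_length]
            exact (pv_cnt_eq_zero_iff seqs res cur).1 hcnt_cur p hp h2
        · intro v hv
          rcases List.mem_append.1 hv with hv | hv
          · rcases List.mem_append.1 hv with hv | hv
            · exact hel v (by simp [hv])
            · rw [List.mem_singleton] at hv
              subst hv
              exact hel v (by simp)
          · have h1 := (hmemq v).1 hv
            have : (cur, v) ∈ pvPairs seqs := by
              rw [← pv_mem_edges0, ← htg']
              exact h1.1
            exact (pv_mem_pvElems this).2
      obtain ⟨hI2, hpre2, hhead2, hchain2⟩ := ih r0.1 (res ++ [cur]) r0.2 hInv'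
      rw [hloop]
      refine ⟨hI2, ?_, ?_, ?_⟩
      · exact List.IsPrefix.trans (List.prefix_append res [cur]) hpre2
      · intro hlen
        have hlen' : res.length < (res ++ [cur]).length := by simp
        have : res.length < (pvLoopA edges f (r0.1, res ++ [cur], r0.2)).2.1.length := hlen
        rw [pv_prefix_getElem_bang hpre2 (by simp <;> omega)]
        rw [pv_getElem_bang _ _ (by simp <;> omega)]
        simp
      · intro j hj hj1
        by_cases hjc : res.length + 1 ≤ j
        · exact hchain2 j (by simp; omega) hj1
        · have hj' : j = res.length := by omega
          subst hj'
          have hcur_at : (pvLoopA edges f (r0.1, res ++ [cur], r0.2)).2.1[res.length]! = cur := by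
            rw [pv_prefix_getElem_bang hpre2 (by simp <;> omega)]
            rw [pv_getElem_bang _ _ (by simp <;> omega)]
            simp
          rw [hcur_at]
          have hmem : (pvLoopA edges f (r0.1, res ++ [cur], r0.2)).2.1[res.length + 1]! ∈ r0.1 := by
            have hh := hhead2 (by simp <;> omega)
            have hlenrw : (res ++ [cur]).length = res.length + 1 := by simp
            rwa [hlenrw] at hh
          have h1 := (hmemq _).1 hmem
          rw [← pv_mem_edges0, ← htg']
          exact h1.1

-- forward: under pvBconds the loop is forced along org
theorem pv_countP_split (l : List (Int × Int)) (p q : Int × Int → Bool) :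
    l.countP p = l.countP (fun a => p a && q a) + l.countP (fun a => p a && !q a) := by
  induction l with
  | nil => rfl
  | cons x t ih =>
    simp only [List.countP_cons, ih]
    by_cases hp : p x <;> by_cases hq : q x <;> simp [hp, hq] <;> omega

theorem pv_idx_mem_take (org : List Int) (hnd : org.Nodup) (v : Int) (hv : v ∈ org) (k : Nat) :
    v ∈ org.take k ↔ org.idxOf v < k := by
  constructor
  · intro h
    obtain ⟨i, hi, hiv⟩ := List.mem_iff_getElem.1 h
    rw [List.length_take] at hi
    have hl : i < org.length := by omega
    rw [List.getElem_take] at hiv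
    rw [← hiv, List.Nodup.idxOf_getElem hnd i hl]
    omega
  · intro h
    have hlt : org.idxOf v < org.length := List.idxOf_lt_length_of_mem hv
    have : (org.take k)[org.idxOf v]'(by rw [List.length_take]; omega) = v := by
      rw [List.getElem_take]
      exact List.getElem_idxOf hlt
    rw [← this]
    exact List.getElem_mem _

theorem pv_getElem_idxOf_eq (org : List Int) (hnd : org.Nodup) (k : Nat) (hk : k < org.length) :
    org.idxOf (org[k]!) = k := by
  rw [pv_getElem_bang _ _ hk]
  exact List.Nodup.idxOf_getElem hnd k hk

-- under pvBconds, the only node that can be enqueued while popping org[k] is org[k+1]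
theorem pv_forced_trigger (org : List Int) (seqs : List (List Int)) (hB : pvBconds org seqs)
    (k : Nat) (hk : k < org.length) (w : Int) :
    (w ∈ pvEdges0 seqs (org[k]!) ∧
      (pvCnt seqs (org.take k) w : Int) = ((pvEdges0 seqs (org[k]!)).count w : Int)) ↔
    (k + 1 < org.length ∧ w = org[k + 1]!) := by
  obtain ⟨hnd, hEsub, hOsub, hordP, hchainP⟩ := hB
  have hsplit : pvCnt seqs (org.take k) w =
      (pvPairs seqs).countP (fun p => decide (p.2 = w ∧ p.1 ∉ org.take k) &&
        decide (p.1 = org[k]!)) +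
      (pvPairs seqs).countP (fun p => decide (p.2 = w ∧ p.1 ∉ org.take k) &&
        !decide (p.1 = org[k]!)) := by
    rw [pvCnt]
    exact pv_countP_split _ _ _
  have hknot : org[k]! ∉ org.take k := by
    intro hc
    rw [pv_idx_mem_take org hnd _ (by rw [pv_getElem_bang _ _ hk]; exact List.getElem_mem _) k,
      pv_getElem_idxOf_eq org hnd k hk] at hc
    omega
  have hfirst : (pvPairs seqs).countP (fun p => decide (p.2 = w ∧ p.1 ∉ org.take k) &&
      decide (p.1 = org[k]!)) = (pvEdges0 seqs (org[k]!)).count w := by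
    rw [pv_edges0_count]
    apply List.countP_congr
    intro p _
    simp only [Bool.and_eq_true, decide_eq_true_eq]
    constructor
    · rintro ⟨⟨h2, _⟩, h1⟩
      exact ⟨h1, h2⟩
    · rintro ⟨h1, h2⟩
      exact ⟨⟨h2, h1 ▸ hknot⟩, h1⟩
  constructor
  · rintro ⟨hmem, heq⟩
    have hpair : (org[k]!, w) ∈ pvPairs seqs := (pv_mem_edges0 seqs _ w).1 hmem
    have hwE : w ∈ pvElems seqs := (pv_mem_pvElems hpair).2
    have hwO : w ∈ org := hEsub w hwE
    have hj : org.idxOf w < org.length := List.idxOf_lt_length_of_mem hwO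
    have hgt : k < org.idxOf w := by
      have := hordP _ hpair
      rwa [pv_getElem_idxOf_eq org hnd k hk] at this
    by_cases hj2 : k + 2 ≤ org.idxOf w
    · exfalso
      have hq : (org[org.idxOf w - 1]!, org[org.idxOf w - 1 + 1]!) ∈ pvPairs seqs :=
        hchainP (org.idxOf w - 1) (by omega)
      have hqw : org[org.idxOf w - 1 + 1]! = w := by
        rw [show org.idxOf w - 1 + 1 = org.idxOf w by omega, pv_getElem_bang _ _ hj]
        exact List.getElem_idxOf hj
      have hq1idx : org.idxOf (org[org.idxOf w - 1]!) = org.idxOf w - 1 :=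
        pv_getElem_idxOf_eq org hnd _ (by omega)
      have hsecond_pos : 0 < (pvPairs seqs).countP (fun p => decide (p.2 = w ∧ p.1 ∉ org.take k) &&
          !decide (p.1 = org[k]!)) := by
        rw [List.countP_pos_iff]
        refine ⟨(org[org.idxOf w - 1]!, w), by rwa [hqw] at hq, ?_⟩
        simp only [Bool.and_eq_true, decide_eq_true_eq, Bool.not_eq_eq_eq_not, Bool.not_true,
          decide_eq_false_iff_not]
        refine ⟨⟨by trivial, ?_⟩, ?_⟩
        · intro hc
          rw [pv_idx_mem_take org hnd _ (by rw [pv_getElem_bang _ _ (show org.idxOf w - 1 < org.length by omega)]; exact List.getElem_mem _) k, hq1idx] at hc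
          omega
        · intro hc
          have h3 : List.idxOf (org[List.idxOf w org - 1]!) org = List.idxOf (org[k]!) org := by
            rw [hc]
          rw [hq1idx, pv_getElem_idxOf_eq org hnd k hk] at h3
          omega
      rw [hsplit, hfirst] at heq
      push_cast at heq
      omega
    · have hjeq : org.idxOf w = k + 1 := by omega
      refine ⟨by omega, ?_⟩
      have hww : org[org.idxOf w]! = w := by
        rw [pv_getElem_bang _ _ hj]
        exact List.getElem_idxOf hj
      rw [← hww, hjeq]
  · rintro ⟨hk1, rfl⟩
    have hpair : (org[k]!, org[k + 1]!) ∈ pvPairs seqs := hchainP k hk1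
    have hidx1 : org.idxOf (org[k + 1]!) = k + 1 := pv_getElem_idxOf_eq org hnd _ hk1
    refine ⟨(pv_mem_edges0 seqs _ _).2 hpair, ?_⟩
    rw [hsplit, hfirst]
    have hzero : (pvPairs seqs).countP (fun p => decide (p.2 = org[k + 1]! ∧ p.1 ∉ org.take k) &&
        !decide (p.1 = org[k]!)) = 0 := by
      rw [List.countP_eq_zero]
      intro p hp hc
      simp only [Bool.and_eq_true, decide_eq_true_eq, Bool.not_eq_eq_eq_not, Bool.not_true,
        decide_eq_false_iff_not] at hc
      obtain ⟨⟨h2, h1nt⟩, h1ne⟩ := hc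
      have h1E : p.1 ∈ pvElems seqs := (pv_mem_pvElems hp).1
      have h1O : p.1 ∈ org := hEsub _ h1E
      have h1lt : org.idxOf p.1 < org.idxOf p.2 := hordP p hp
      rw [h2, hidx1] at h1lt
      have h1ge : ¬ org.idxOf p.1 < k := by
        intro hc2
        exact h1nt ((pv_idx_mem_take org hnd _ h1O k).2 hc2)
      have h1k : org.idxOf p.1 = k := by omega
      apply h1ne
      have hbang : org[org.idxOf p.1]! = p.1 := by
        rw [pv_getElem_bang _ _ (List.idxOf_lt_length_of_mem h1O)]
        exact List.getElem_idxOf _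
      rw [← hbang, h1k]
    rw [hzero]
    push_cast
    ring

theorem pv_loop_forced (org : List Int) (seqs : List (List Int))
    (edges : PySem.Dict Int (List Int)) (hE : ∀ u, edges.getD u [] = pvEdges0 seqs u)
    (hB : pvBconds org seqs) :
    ∀ (fuel k : Nat) (ind : PySem.Dict Int Int), k ≤ org.length → org.length - k < fuel →
      (∀ v, ind.getD v 0 = (pvCnt seqs (org.take k) v : Int)) →
      (pvLoopA edges fuel ((if k = org.length then [] else [org[k]!]), org.take k, ind)).1 = [] ∧
      (pvLoopA edges fuel ((if k = org.length then [] else [org[k]!]), org.take k, ind)).2.1 = org := by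
  intro fuel
  induction fuel with
  | zero =>
    intro k ind hk hfuel hind
    omega
  | succ f ih =>
    intro k ind hk hfuel hind
    by_cases hkn : k = org.length
    · rw [if_pos hkn]
      subst hkn
      exact ⟨rfl, by simp [pvLoopA]⟩
    · rw [if_neg hkn]
      have hklt : k < org.length := by omega
      have hloop : pvLoopA edges (f + 1) ([org[k]!], org.take k, ind) =
          pvLoopA edges f (((edges.getD (org[k]!) []).foldl pvDecStep ([], ind)).1,
            org.take k ++ [org[k]!],
            ((edges.getD (org[k]!) []).foldl pvDecStep ([], ind)).2) := rfl
      have hnd := hB.1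
      have hknot : org[k]! ∉ org.take k := by
        intro hc
        rw [pv_idx_mem_take org hnd _ (by rw [pv_getElem_bang _ _ hklt]; exact List.getElem_mem _) k,
          pv_getElem_idxOf_eq org hnd k hklt] at hc
        omega
      have htake1 : org.take k ++ [org[k]!] = org.take (k + 1) := by
        rw [pv_getElem_bang _ _ hklt, ← List.concat_eq_append]
        exact List.take_concat_get hklt
      set tg := edges.getD (org[k]!) [] with htg
      have htg' : tg = pvEdges0 seqs (org[k]!) := hE _
      have hcount_le : ∀ v, (tg.count v : Int) ≤ ind.getD v 0 := by
        intro v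
        rw [hind v, htg', pv_edges0_count, pvCnt]
        push_cast
        apply Nat.cast_le.2
        apply List.countP_mono_left
        intro p _ hp
        simp only [decide_eq_true_eq] at hp ⊢
        exact ⟨hp.2, hp.1 ▸ hknot⟩
      set r0 := tg.foldl pvDecStep ([], ind) with hr0
      have hind' : ∀ v, r0.2.getD v 0 = (pvCnt seqs (org.take (k + 1)) v : Int) := by
        intro v
        rw [hr0, pv_dec_ind, hind v]
        have := pv_cnt_step seqs (org.take k) (org[k]!) v hknot
        rw [htake1] at this
        rw [htg', pv_edges0_count]
        rw [pv_edges0_count] at this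
        push_cast
        omega
      have hmemq : ∀ w, w ∈ r0.1 ↔ (k + 1 < org.length ∧ w = org[k + 1]!) := by
        intro w
        rw [hr0]
        have hd := pv_dec_mem tg [] ind hcount_le w
        simp only [List.not_mem_nil, false_or] at hd
        rw [hd, hind w, htg']
        exact pv_forced_trigger org seqs hB k hklt w
      have hq' : r0.1 = (if k + 1 = org.length then [] else [org[k + 1]!]) := by
        by_cases hk1 : k + 1 = org.length
        · rw [if_pos hk1]
          apply List.eq_nil_iff_forall_not_mem.2
          intro w hw
          have := (hmemq w).1 hw
          omega
        · rw [if_neg hk1]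
          apply pv_singleton_of_nodup
          · rw [hr0]
            apply pv_dec_nodup tg [] ind hcount_le (by simp)
            simp
          · intro w
            rw [hmemq w]
            constructor
            · rintro ⟨_, hww⟩; exact hww
            · intro hww; exact ⟨by omega, hww⟩
      rw [hloop, htake1, hq']
      exact ih (k + 1) r0.2 (by omega) (by omega) hind'

-- ---- port B characterization ----
theorem pv_enum_map_snd (org : List Int) (k : Int) :
    (PySem.List.enumerate org k).map Prod.snd = org := by
  induction org generalizing k with
  | nil => rfl
  | cons a t ih =>
    have : PySem.List.enumerate (a :: t) k = (k, a) :: PySem.List.enumerate t (k + 1) := by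
      simp [PySem.List.enumerate]
    rw [this, List.map_cons, ih]

theorem pv_pos_keys (org : List Int) :
    (pvBPos org).keys = PySem.Set.ofList org := by
  rw [pvBPos]
  have := PySem.Dict.keys_foldl_insert_key (PySem.List.enumerate org 0) Prod.snd
    (fun _ p => p.1) PySem.Dict.empty
  rw [this, pv_enum_map_snd]
  rfl

theorem pv_pos_contains (org : List Int) (v : Int) :
    (pvBPos org).contains v = true ↔ v ∈ org := by
  rw [PySem.Dict.contains_iff_mem_keys, pv_pos_keys, PySem.Set.mem_ofList]

theorem pv_pos_getD_skip (l : List (Int × Int)) (d : PySem.Dict Int Int) (w : Int)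
    (h : w ∉ l.map Prod.snd) :
    (l.foldl (fun d p => d.insert p.2 p.1) d).getD w 0 = d.getD w 0 := by
  induction l generalizing d with
  | nil => rfl
  | cons p t ih =>
    simp only [List.map_cons, List.mem_cons, not_or] at h
    rw [List.foldl_cons, ih _ h.2]
    rw [PySem.Dict.getD_insert, if_neg h.1]

theorem pv_pos_getD_gen (org : List Int) (hnd : org.Nodup) :
    ∀ (k : Int) (d : PySem.Dict Int Int) (v : Int), v ∈ org →
      ((PySem.List.enumerate org k).foldl (fun d p => d.insert p.2 p.1) d).getD v 0 =
        k + (org.idxOf v : Int) := by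
  induction org with
  | nil => intro k d v hv; simp at hv
  | cons a t ih =>
    intro k d v hv
    have henum : PySem.List.enumerate (a :: t) k = (k, a) :: PySem.List.enumerate t (k + 1) := by
      simp [PySem.List.enumerate]
    rw [henum, List.foldl_cons]
    rcases List.mem_cons.1 hv with hv | hv
    · subst hv
      have hnt : v ∉ t := (List.nodup_cons.1 hnd).1
      rw [pv_pos_getD_skip _ _ _ (by rw [pv_enum_map_snd]; exact hnt)]
      rw [PySem.Dict.getD_insert, if_pos rfl, List.idxOf_cons_self]
      simp
    · have hvna : v ≠ a := by
        intro hc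
        rw [hc] at hv
        exact (List.nodup_cons.1 hnd).1 hv
      rw [ih (List.nodup_cons.1 hnd).2 (k + 1) _ v hv]
      rw [List.idxOf_cons_ne _ (fun hc => hvna hc.symm)]
      push_cast
      ring

theorem pv_pos_getD (org : List Int) (hnd : org.Nodup) (v : Int) (hv : v ∈ org) :
    (pvBPos org).getD v 0 = (org.idxOf v : Int) := by
  rw [pvBPos, pv_pos_getD_gen org hnd 0 PySem.Dict.empty v hv]
  ring

theorem pv_bseen_some (pos : PySem.Dict Int Int) (seq : List Int) (seen : PySem.Set Int)
    (h : ∀ v ∈ seq, pos.contains v = true) :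
    pvBSeen pos seq seen = some (PySem.Set.update seen seq) := by
  induction seq generalizing seen with
  | nil => rfl
  | cons v vs ih =>
    rw [pvBSeen, if_pos (h v (by simp))]
    exact ih _ (fun w hw => h w (by simp [hw]))

theorem pv_bseen_isSome (pos : PySem.Dict Int Int) (seq : List Int) (seen : PySem.Set Int)
    (h : (pvBSeen pos seq seen).isSome) : ∀ v ∈ seq, pos.contains v = true := by
  induction seq generalizing seen with
  | nil => simp
  | cons v vs ih =>
    rw [pvBSeen] at h
    by_cases hc : pos.contains v = true
    · rw [if_pos hc] at h
      intro w hw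
      rcases List.mem_cons.1 hw with hw | hw
      · subst hw; exact hc
      · exact ih _ h w hw
    · rw [if_neg hc] at h
      simp at h

def pvMatchList (pos : PySem.Dict Int Int) (ps : List (Int × Int)) : List Int :=
  (ps.filter (fun p => pos.getD p.1 0 + 1 == pos.getD p.2 0)).map (fun p => pos.getD p.1 0)

theorem pv_matchList_cons (pos : PySem.Dict Int Int) (a b : Int) (ps : List (Int × Int)) :
    pvMatchList pos ((a, b) :: ps) =
      (if pos.getD a 0 + 1 == pos.getD b 0 then [pos.getD a 0] else []) ++ pvMatchList pos ps := by
  rw [pvMatchList, pvMatchList, List.filter_cons]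
  by_cases h : (pos.getD a 0 + 1 == pos.getD b 0) = true
  · rw [if_pos h, if_pos h]
    rfl
  · rw [if_neg h, if_neg h]
    rfl

theorem pv_bpairs_some (pos : PySem.Dict Int Int) (ps : List (Int × Int)) (m : PySem.Set Int)
    (h : ∀ p ∈ ps, pos.getD p.1 0 < pos.getD p.2 0) :
    pvBPairs pos ps m = some (PySem.Set.update m (pvMatchList pos ps)) := by
  induction ps generalizing m with
  | nil => rfl
  | cons p ps ih =>
    obtain ⟨a, b⟩ := p
    rw [pvBPairs, if_neg (by simp; exact h (a, b) (by simp))]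
    rw [ih _ (fun q hq => h q (by simp [hq])), pv_matchList_cons]
    by_cases hm : (pos.getD a 0 + 1 == pos.getD b 0) = true
    · rw [if_pos hm, if_pos hm]
      rfl
    · rw [if_neg hm, if_neg hm]
      rfl

theorem pv_bpairs_isSome (pos : PySem.Dict Int Int) (ps : List (Int × Int)) (m : PySem.Set Int)
    (h : (pvBPairs pos ps m).isSome) : ∀ p ∈ ps, pos.getD p.1 0 < pos.getD p.2 0 := by
  induction ps generalizing m with
  | nil => simp
  | cons p ps ih =>
    obtain ⟨a, b⟩ := p
    rw [pvBPairs] at h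
    by_cases hc : pos.getD a 0 ≥ pos.getD b 0
    · rw [if_pos hc] at h
      simp at h
    · rw [if_neg hc] at h
      intro q hq
      rcases List.mem_cons.1 hq with hq | hq
      · subst hq
        simp only at hc ⊢
        omega
      · exact ih _ h q hq

theorem pv_slice_one (seq : List Int) : PySem.List.slice seq (some 1) = seq.tail := by
  rw [PySem.List.slice_from seq (by norm_num : (0:Int) ≤ 1)]
  simp

theorem pv_update_append {α : Type} [BEq α] (s : PySem.Set α) (l1 l2 : List α) :
    PySem.Set.update s (l1 ++ l2) = PySem.Set.update (PySem.Set.update s l1) l2 := by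
  simp [PySem.Set.update, List.foldl_append]

theorem pv_matchList_append (pos : PySem.Dict Int Int) (ps qs : List (Int × Int)) :
    pvMatchList pos (ps ++ qs) = pvMatchList pos ps ++ pvMatchList pos qs := by
  simp [pvMatchList, List.filter_append]

theorem pv_bloop_char (pos : PySem.Dict Int Int) (seqs : List (List Int))
    (st : PySem.Set Int × PySem.Set Int) :
    pvBLoop pos seqs st =
      (if (∀ v ∈ pvElems seqs, pos.contains v = true) ∧
          (∀ p ∈ pvPairs seqs, pos.getD p.1 0 < pos.getD p.2 0) then
        some (PySem.Set.update st.1 (pvElems seqs), PySem.Set.update st.2 (pvMatchList pos (pvPairs seqs)))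
      else none) := by
  induction seqs generalizing st with
  | nil =>
    rw [if_pos ⟨by simp [pvElems], by simp [pvPairs]⟩]
    rfl
  | cons seq rest ih =>
    obtain ⟨seen, matched⟩ := st
    have helems : pvElems (seq :: rest) = seq ++ pvElems rest := by simp [pvElems]
    have hpairs : pvPairs (seq :: rest) = seq.zip seq.tail ++ pvPairs rest := by simp [pvPairs]
    show (match pvBSeen pos seq seen with
      | none => none
      | some seen' =>
        match pvBPairs pos (seq.zip (PySem.List.slice seq (some 1))) matched with
        | none => none
        | some matched' => pvBLoop pos rest (seen', matched')) = _
    rw [pv_slice_one]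
    by_cases hseen : ∀ v ∈ seq, pos.contains v = true
    · rw [pv_bseen_some pos seq seen hseen]
      by_cases hpair : ∀ p ∈ seq.zip seq.tail, pos.getD p.1 0 < pos.getD p.2 0
      · rw [pv_bpairs_some pos _ matched hpair]
        show pvBLoop pos rest (PySem.Set.update seen seq, PySem.Set.update matched _) = _
        rw [ih]
        by_cases hrest : (∀ v ∈ pvElems rest, pos.contains v = true) ∧
            (∀ p ∈ pvPairs rest, pos.getD p.1 0 < pos.getD p.2 0)
        · rw [if_pos hrest, if_pos ?_]
          · rw [helems, hpairs, pv_update_append, pv_matchList_append, pv_update_append]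
          · constructor
            · intro v hv
              rw [helems, List.mem_append] at hv
              rcases hv with hv | hv
              · exact hseen v hv
              · exact hrest.1 v hv
            · intro p hp
              rw [hpairs, List.mem_append] at hp
              rcases hp with hp | hp
              · exact hpair p hp
              · exact hrest.2 p hp
        · rw [if_neg hrest, if_neg ?_]
          intro hc
          apply hrest
          constructor
          · intro v hv
            exact hc.1 v (by rw [helems, List.mem_append]; right; exact hv)
          · intro p hp
            exact hc.2 p (by rw [hpairs, List.mem_append]; right; exact hp)
      · cases hres : pvBPairs pos (seq.zip seq.tail) matched with
        | some m =>
          exact absurd (pv_bpairs_isSome pos _ matched (by rw [hres]; rfl)) hpair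
        | none =>
          rw [if_neg ?_]
          intro hc
          apply hpair
          intro p hp
          exact hc.2 p (by rw [hpairs, List.mem_append]; left; exact hp)
    · cases hres : pvBSeen pos seq seen with
      | some s =>
        exact absurd (pv_bseen_isSome pos seq seen (by rw [hres]; rfl)) hseen
      | none =>
        rw [if_neg ?_]
        intro hc
        apply hseen
        intro v hv
        exact hc.1 v (by rw [helems, List.mem_append]; left; exact hv)

theorem pv_ofList_toFinset (l : List Int) :
    (PySem.Set.ofList l).toFinset = l.toFinset := by
  ext x
  simp [List.mem_toFinset, PySem.Set.mem_ofList]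

theorem pv_ofList_len (l : List Int) :
    (PySem.Set.ofList l).length = l.toFinset.card := by
  rw [← pv_ofList_toFinset]
  exact (List.toFinset_card_of_nodup (PySem.Set.nodup_ofList l)).symm

theorem pv_ofList_len_iff (org : List Int) :
    (PySem.Set.ofList org).length = org.length ↔ org.Nodup := by
  rw [pv_ofList_len, List.card_toFinset]
  constructor
  · intro h
    rw [← List.dedup_eq_self]
    exact List.Sublist.eq_of_length (List.dedup_sublist org) h
  · intro h
    rw [List.dedup_eq_self.2 h]

theorem pv_alt_unfold (org : List Int) (seqs : List (List Int)) :
    sequenceReconstruction_bfs_alt org seqs =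
      (if (PySem.Set.ofList org).length ≠ org.length then false
       else
        match pvBLoop (pvBPos org) seqs (PySem.Set.empty, PySem.Set.empty) with
        | none => false
        | some (seen, matched) =>
          (seen.length == org.length &&
            ((matched.length : Int) == max ((org.length : Int) - 1) 0))) := rfl

theorem pv_update_empty (l : List Int) :
    PySem.Set.update PySem.Set.empty l = PySem.Set.ofList l := by
  rw [PySem.Set.ofList_eq_foldl]
  rfl

theorem pv_toFinset_sub (l1 l2 : List Int) (h : ∀ v ∈ l1, v ∈ l2) :
    l1.toFinset ⊆ l2.toFinset := by
  intro x hx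
  rw [List.mem_toFinset] at hx ⊢
  exact h x hx

theorem pv_alt_iff (org : List Int) (seqs : List (List Int)) :
    sequenceReconstruction_bfs_alt org seqs = true ↔ pvBconds org seqs := by
  rw [pv_alt_unfold]
  by_cases hnd : org.Nodup
  · rw [if_neg (by rw [Ne, pv_ofList_len_iff]; exact fun h => h hnd)]
    rw [pv_bloop_char]
    by_cases hC : (∀ v ∈ pvElems seqs, (pvBPos org).contains v = true) ∧
        (∀ p ∈ pvPairs seqs, (pvBPos org).getD p.1 0 < (pvBPos org).getD p.2 0)
    · rw [if_pos hC]
      -- memberships and index translations available on this branch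
      have hsubO : ∀ v ∈ pvElems seqs, v ∈ org := by
        intro v hv
        exact (pv_pos_contains org v).1 (hC.1 v hv)
      have hgetP : ∀ p ∈ pvPairs seqs, (pvBPos org).getD p.1 0 = (org.idxOf p.1 : Int) ∧
          (pvBPos org).getD p.2 0 = (org.idxOf p.2 : Int) := by
        intro p hp
        obtain ⟨h1, h2⟩ := pv_mem_pvElems hp
        exact ⟨pv_pos_getD org hnd p.1 (hsubO _ h1), pv_pos_getD org hnd p.2 (hsubO _ h2)⟩
      have hordP : ∀ p ∈ pvPairs seqs, org.idxOf p.1 < org.idxOf p.2 := by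
        intro p hp
        have := hC.2 p hp
        rw [(hgetP p hp).1, (hgetP p hp).2] at this
        exact_mod_cast this
      simp only [pv_update_empty]
      rw [Bool.and_eq_true, beq_iff_eq, beq_iff_eq]
      have hA : (PySem.Set.ofList (pvElems seqs)).length = org.length ↔
          (∀ v ∈ org, v ∈ pvElems seqs) := by
        rw [pv_ofList_len]
        have hsub : (pvElems seqs).toFinset ⊆ org.toFinset := pv_toFinset_sub _ _ hsubO
        have horgcard : org.toFinset.card = org.length := List.toFinset_card_of_nodup hnd
        constructor
        · intro h
          have heq : (pvElems seqs).toFinset = org.toFinset :=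
            Finset.eq_of_subset_of_card_le hsub (by omega)
          intro v hv
          rw [← List.mem_toFinset, heq, List.mem_toFinset]
          exact hv
        · intro h
          have heq : (pvElems seqs).toFinset = org.toFinset := by
            apply Finset.Subset.antisymm hsub
            exact pv_toFinset_sub _ _ h
          rw [heq, horgcard]
      have hmemM : ∀ m : Int, m ∈ pvMatchList (pvBPos org) (pvPairs seqs) ↔
          ∃ p ∈ pvPairs seqs, org.idxOf p.1 + 1 = org.idxOf p.2 ∧ m = (org.idxOf p.1 : Int) := by
        intro m
        simp only [pvMatchList, List.mem_map, List.mem_filter, beq_iff_eq]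
        constructor
        · rintro ⟨p, ⟨hp, hpm⟩, hm⟩
          obtain ⟨hg1, hg2⟩ := hgetP p hp
          rw [hg1, hg2] at hpm
          rw [hg1] at hm
          refine ⟨p, hp, by exact_mod_cast hpm, hm.symm⟩
        · rintro ⟨p, hp, hpm, hm⟩
          obtain ⟨hg1, hg2⟩ := hgetP p hp
          refine ⟨p, ⟨hp, ?_⟩, ?_⟩
          · rw [hg1, hg2]
            exact_mod_cast hpm
          · rw [hg1, hm]
      have hB : ((PySem.Set.ofList (pvMatchList (pvBPos org) (pvPairs seqs))).length : Int) =
          max ((org.length : Int) - 1) 0 ↔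
          (∀ i : Nat, i + 1 < org.length → (org[i]!, org[i + 1]!) ∈ pvPairs seqs) := by
        rw [pv_ofList_len]
        have hmax : max ((org.length : Int) - 1) 0 = ((org.length - 1 : Nat) : Int) := by omega
        rw [hmax]
        rw [show ((((pvMatchList (pvBPos org) (pvPairs seqs)).toFinset.card : Nat) : Int) =
            ((org.length - 1 : Nat) : Int)) ↔
            ((pvMatchList (pvBPos org) (pvPairs seqs)).toFinset.card = org.length - 1) from
          ⟨fun h => by exact_mod_cast h, fun h => by exact_mod_cast h⟩]
        set T := (pvMatchList (pvBPos org) (pvPairs seqs)).toFinset with hT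
        set S : Finset Int := (Finset.range (org.length - 1)).image (fun i : Nat => (i : Int)) with hS
        have hScard : S.card = org.length - 1 := by
          rw [hS, Finset.card_image_of_injective _ (fun a b h => by exact_mod_cast h),
            Finset.card_range]
        have hTS : T ⊆ S := by
          intro m hm
          rw [hT, List.mem_toFinset, hmemM] at hm
          obtain ⟨p, hp, hpm, hmv⟩ := hm
          have h2lt : org.idxOf p.2 < org.length :=
            List.idxOf_lt_length_of_mem (hsubO _ (pv_mem_pvElems hp).2)
          rw [hS, Finset.mem_image]
          exact ⟨org.idxOf p.1, Finset.mem_range.2 (by omega), hmv.symm⟩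
        constructor
        · intro hcard
          have hTeq : T = S := Finset.eq_of_subset_of_card_le hTS (by omega)
          intro i hi
          have hiT : ((i : Nat) : Int) ∈ T := by
            rw [hTeq, hS, Finset.mem_image]
            exact ⟨i, Finset.mem_range.2 (by omega), rfl⟩
          rw [hT, List.mem_toFinset, hmemM] at hiT
          obtain ⟨p, hp, hpm, hmv⟩ := hiT
          have hi1 : org.idxOf p.1 = i := by exact_mod_cast hmv.symm
          have hi2 : org.idxOf p.2 = i + 1 := by omega
          have h1O : p.1 ∈ org := hsubO _ (pv_mem_pvElems hp).1
          have h2O : p.2 ∈ org := hsubO _ (pv_mem_pvElems hp).2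
          have hp1 : org[i]! = p.1 := by
            rw [← hi1, pv_getElem_bang _ _ (List.idxOf_lt_length_of_mem h1O)]
            exact List.getElem_idxOf _
          have hp2 : org[i + 1]! = p.2 := by
            rw [← hi2, pv_getElem_bang _ _ (List.idxOf_lt_length_of_mem h2O)]
            exact List.getElem_idxOf _
          rw [hp1, hp2]
          exact Prod.mk.eta.symm ▸ hp
        · intro hchain
          have hST2 : S ⊆ T := by
            intro m hm
            rw [hS, Finset.mem_image] at hm
            obtain ⟨i, hir, him⟩ := hm
            rw [Finset.mem_range] at hir
            have hi1 : i + 1 < org.length := by omega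
            have hp := hchain i hi1
            rw [hT, List.mem_toFinset, hmemM]
            refine ⟨(org[i]!, org[i + 1]!), hp, ?_, ?_⟩
            · rw [pv_getElem_idxOf_eq org hnd i (by omega), pv_getElem_idxOf_eq org hnd (i + 1) hi1]
            · rw [pv_getElem_idxOf_eq org hnd i (by omega), ← him]
          rw [Finset.Subset.antisymm hTS hST2, hScard]
      constructor
      · rintro ⟨h1, h2⟩
        exact ⟨hnd, hsubO, hA.1 h1, hordP, hB.1 h2⟩
      · rintro ⟨_, _, h3, _, h5⟩
        exact ⟨hA.2 h3, hB.2 h5⟩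
    · rw [if_neg hC]
      simp only [Bool.false_eq_true, false_iff]
      rintro ⟨hndO, hsubO, hsubE, hordP, hchainP⟩
      apply hC
      constructor
      · intro v hv
        exact (pv_pos_contains org v).2 (hsubO v hv)
      · intro p hp
        obtain ⟨h1, h2⟩ := pv_mem_pvElems hp
        rw [pv_pos_getD org hndO p.1 (hsubO _ h1), pv_pos_getD org hndO p.2 (hsubO _ h2)]
        exact_mod_cast hordP p hp
  · rw [if_pos (by rw [Ne, pv_ofList_len_iff]; exact fun h => hnd h)]
    simp only [Bool.false_eq_true, false_iff]
    rintro ⟨hndO, _⟩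
    exact hnd hndO

-- ---- port A characterization ----
def pvIndeg (seqs : List (List Int)) : PySem.Dict Int Int := (pvBuild seqs).1.2
def pvQueue0 (seqs : List (List Int)) : List Int :=
  (pvIndeg seqs).keys.filter (fun k => (pvIndeg seqs).getD k 0 == 0)
def pvAres (seqs : List (List Int)) : List Int × List Int × PySem.Dict Int Int :=
  pvLoopA (pvBuild seqs).1.1 ((pvIndeg seqs).size + 1) (pvQueue0 seqs, [], pvIndeg seqs)

theorem pv_a_unfold (org : List Int) (seqs : List (List Int)) :
    sequenceReconstruction_bfs org seqs =
      (if (pvAres seqs).1.length > 1 then false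
       else ((pvAres seqs).2.1.length == (pvBuild seqs).2.length && (pvAres seqs).2.1 == org)) := rfl

theorem pv_hE (seqs : List (List Int)) :
    ∀ u, ((pvBuild seqs).1.1).getD u [] = pvEdges0 seqs u := by
  intro u
  rw [pv_build_eq, pv_bfold_edges]
  simp [PySem.Dict.getD_empty]

theorem pv_hindeg (seqs : List (List Int)) :
    ∀ v, (pvIndeg seqs).getD v 0 = (pvCnt seqs [] v : Int) := by
  intro v
  rw [pvIndeg, pv_build_eq, pv_bfold_ind, pv_cnt_nil]
  simp [PySem.Dict.getD_empty]

theorem pv_hkeys_mem (seqs : List (List Int)) (v : Int) :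
    v ∈ (pvIndeg seqs).keys ↔ v ∈ pvElems seqs := by
  rw [pvIndeg, pv_build_eq, pv_bfold_keys_mem]
  simp [PySem.Dict.keys_empty]

theorem pv_hkeys_nd (seqs : List (List Int)) : (pvIndeg seqs).keys.Nodup := by
  rw [pvIndeg, pv_build_eq]
  exact pv_bfold_keys_nodup seqs _ PySem.Dict.nodup_keys_empty

theorem pv_hnodes_mem (seqs : List (List Int)) (v : Int) :
    v ∈ (pvBuild seqs).2 ↔ v ∈ pvElems seqs := by
  rw [pv_build_eq, pv_bfold_nodes_mem]
  simp [PySem.Set.empty]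

theorem pv_hnodes_nd (seqs : List (List Int)) : List.Nodup (pvBuild seqs).2 := by
  rw [pv_build_eq]
  exact pv_bfold_nodes_nodup seqs _ (by simp [PySem.Set.empty])

theorem pv_hq_mem (seqs : List (List Int)) (v : Int) :
    v ∈ pvQueue0 seqs ↔ v ∈ pvElems seqs ∧ pvCnt seqs [] v = 0 := by
  rw [pvQueue0, List.mem_filter, pv_hkeys_mem]
  have := pv_hindeg seqs v
  constructor
  · rintro ⟨h1, h2⟩
    refine ⟨h1, ?_⟩
    rw [beq_iff_eq, this] at h2
    exact_mod_cast h2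
  · rintro ⟨h1, h2⟩
    refine ⟨h1, ?_⟩
    rw [beq_iff_eq, this, h2]
    rfl

theorem pv_hq_nd (seqs : List (List Int)) : (pvQueue0 seqs).Nodup :=
  List.Nodup.filter _ (pv_hkeys_nd seqs)

theorem pv_hInv0 (seqs : List (List Int)) : pvInv seqs (pvQueue0 seqs) [] (pvIndeg seqs) := by
  refine ⟨by simpa using pv_hq_nd seqs, pv_hindeg seqs, ?_, by simp, ?_⟩
  · intro v hv
    exact ((pv_hq_mem seqs v).1 hv).2
  · intro v hv
    simp only [List.nil_append] at hv
    exact ((pv_hq_mem seqs v).1 hv).1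

theorem pv_size_keys (seqs : List (List Int)) : (pvIndeg seqs).size = (pvIndeg seqs).keys.length := by
  simp [PySem.Dict.size, PySem.Dict.keys]

theorem pv_a_iff (org : List Int) (seqs : List (List Int)) :
    sequenceReconstruction_bfs org seqs = true ↔ pvBconds org seqs := by
  rw [pv_a_unfold]
  constructor
  · intro hA
    have hle : ¬ (pvAres seqs).1.length > 1 := by
      intro hgt
      rw [if_pos hgt] at hA
      exact Bool.false_ne_true hA
    rw [if_neg hle, Bool.and_eq_true, beq_iff_eq, beq_iff_eq] at hA
    obtain ⟨hlen, hres⟩ := hA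
    obtain ⟨hIr, hpre, hhead, hchain⟩ :=
      pv_loop_general seqs (pvBuild seqs).1.1 (pv_hE seqs)
        ((pvIndeg seqs).size + 1) (pvQueue0 seqs) [] (pvIndeg seqs) (pv_hInv0 seqs)
    rw [show (pvLoopA (pvBuild seqs).1.1 ((pvIndeg seqs).size + 1)
        (pvQueue0 seqs, [], pvIndeg seqs)) = pvAres seqs from rfl] at hIr hpre hhead hchain
    have hndO : org.Nodup := by
      have h1 := hIr.1
      rw [hres] at h1
      rw [List.nodup_append] at h1
      exact h1.1
    have hsubE : ∀ v ∈ org, v ∈ pvElems seqs := by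
      intro v hv
      have := hIr.2.2.2.2 v (by rw [hres]; exact List.mem_append.2 (Or.inl hv))
      exact this
    have hsubO : ∀ v ∈ pvElems seqs, v ∈ org := by
      have hsub2 : org ⊆ (pvBuild seqs).2 := by
        intro v hv
        exact (pv_hnodes_mem seqs v).2 (hsubE v hv)
      have hsp : org.Subperm (pvBuild seqs).2 := List.subperm_of_subset hndO hsub2
      have hperm : org.Perm (pvBuild seqs).2 := by
        apply hsp.perm_of_length_le
        rw [← hlen, hres]
      intro v hv
      exact hperm.mem_iff.2 ((pv_hnodes_mem seqs v).2 hv)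
    refine ⟨hndO, hsubO, hsubE, ?_, ?_⟩
    · intro p hp
      have h2O : p.2 ∈ org := hsubO _ (pv_mem_pvElems hp).2
      have hj : org.idxOf p.2 < org.length := List.idxOf_lt_length_of_mem h2O
      have hgete : org[org.idxOf p.2]! = p.2 := by
        rw [pv_getElem_bang _ _ hj]
        exact List.getElem_idxOf hj
      have := hIr.2.2.2.1 (org.idxOf p.2) (by rw [hres]; exact hj) p hp
        (by rw [hres, hgete])
      rw [hres] at this
      have h1t : p.1 ∈ org.take (org.idxOf p.2) := this
      have h1O : p.1 ∈ org := List.take_subset _ _ h1t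
      exact (pv_idx_mem_take org hndO p.1 h1O _).1 h1t
    · intro i hi
      have := hchain i (by simp) (by rw [hres]; exact hi)
      rwa [hres] at this
  · intro hB
    obtain ⟨hndO, hsubO, hsubE, hordP, hchainP⟩ := hB
    have hq0 : pvQueue0 seqs = (if 0 = org.length then [] else [org[0]!]) := by
      by_cases hn : 0 = org.length
      · rw [if_pos hn]
        apply List.eq_nil_iff_forall_not_mem.2
        intro v hv
        have h1 := ((pv_hq_mem seqs v).1 hv).1
        have h2 := hsubO v h1
        rw [List.length_eq_zero_iff.1 hn.symm] at h2
        simp at h2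
      · rw [if_neg hn]
        have hnpos : 0 < org.length := by omega
        apply pv_singleton_of_nodup (pv_hq_nd seqs)
        intro v
        rw [pv_hq_mem]
        constructor
        · rintro ⟨hvE, hvc⟩
          have hvO : v ∈ org := hsubO v hvE
          have hjl : org.idxOf v < org.length := List.idxOf_lt_length_of_mem hvO
          have hidx0 : org.idxOf v = 0 := by
            by_contra hne
            have hpair := hchainP (org.idxOf v - 1) (by omega)
            have hqw : org[org.idxOf v - 1 + 1]! = v := by
              rw [show org.idxOf v - 1 + 1 = org.idxOf v by omega, pv_getElem_bang _ _ hjl]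
              exact List.getElem_idxOf hjl
            rw [hqw] at hpair
            have := (pv_cnt_eq_zero_iff seqs [] v).1 hvc _ hpair rfl
            simp at this
          have hww : org[org.idxOf v]! = v := by
            rw [pv_getElem_bang _ _ hjl]
            exact List.getElem_idxOf hjl
          rw [← hww, hidx0]
        · intro hv
          subst hv
          have hmemO : org[0]! ∈ org := by
            rw [pv_getElem_bang _ _ hnpos]
            exact List.getElem_mem _
          refine ⟨hsubE _ hmemO, ?_⟩
          rw [pv_cnt_eq_zero_iff]
          intro p hp h2
          exfalso
          have := hordP p hp
          rw [h2, pv_getElem_idxOf_eq org hndO 0 hnpos] at this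
          omega
    have hnle : org.length ≤ (pvIndeg seqs).size := by
      rw [pv_size_keys]
      have hsub : org ⊆ (pvIndeg seqs).keys := by
        intro v hv
        exact (pv_hkeys_mem seqs v).2 (hsubE v hv)
      exact (List.subperm_of_subset hndO hsub).length_le
    have hforced := pv_loop_forced org seqs (pvBuild seqs).1.1 (pv_hE seqs)
      ⟨hndO, hsubO, hsubE, hordP, hchainP⟩ ((pvIndeg seqs).size + 1) 0 (pvIndeg seqs)
      (by omega) (by omega) (by simpa using pv_hindeg seqs)
    rw [← hq0] at hforced
    have hres1 : (pvAres seqs).1 = [] := hforced.1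
    have hres2 : (pvAres seqs).2.1 = org := hforced.2
    rw [if_neg (by rw [hres1]; simp), hres2]
    have hlen : org.length = (pvBuild seqs).2.length := by
      have hperm : org.Perm (pvBuild seqs).2 := by
        apply (List.subperm_of_subset hndO ?_).perm_of_length_le ?_
        · intro v hv
          exact (pv_hnodes_mem seqs v).2 (hsubE v hv)
        · apply List.Subperm.length_le
          apply List.subperm_of_subset (pv_hnodes_nd seqs)
          intro v hv
          exact hsubO v ((pv_hnodes_mem seqs v).1 hv)
      exact hperm.length_eq
    rw [hlen]
    simp

-- ===== VERDICT (by name: the statement is the Claim_ definition above) =====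
theorem sequenceReconstruction_bfs_spec : Claim_equal_sequenceReconstruction_bfs := by
  intro org seqs _
  unfold Spec_sequenceReconstruction_bfs
  by_cases h : pvBconds org seqs
  · rw [(pv_a_iff org seqs).2 h, ((pv_alt_iff org seqs).2 h)]
  · rcases hA : sequenceReconstruction_bfs org seqs with _ | _ <;>
    rcases hB : sequenceReconstruction_bfs_alt org seqs with _ | _ <;> try rfl
    · exact absurd ((pv_alt_iff org seqs).1 hB) h
    · exact absurd ((pv_a_iff org seqs).1 hA) h
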